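-- pv_equiv track=rewrite | github.com/smaranjitghose/Foobar_Challenge | Solutions_Python/queue_to_do.py | solution
-- ===== SOURCE A (Python) =====
-- def solution(start, length):
--
--     def bulk_xor(m, n):
--         m -= 1
--         f_m = [m, 1, m + 1, 0][m % 4]
--         f_n = [n, 1, n + 1, 0][n % 4]
--         return f_m ^ f_n
--
--     xor = 0
--     for i in range(length):
--         xor ^= bulk_xor(start, start + length - i - 1)
--         start += length
--
--     return xor
-- ===== SOURCE B (Python) =====
-- def solution(start, length):
--     total = 0
--     for i in range(length):
--         a = start + i * length
--         k = length - i
--         if a % 2 == 1:          # odd first element stands alone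
--             total ^= a
--             a += 1
--             k -= 1
--         if (k // 2) % 2 == 1:   # each (even, odd) pair XORs to 1
--             total ^= 1
--         if k % 2 == 1:          # unpaired trailing even element
--             total ^= a + k - 1
--     return total
-- ===== Notes on version B (the rewrite author's own statement) =====
-- stated objective: alternative
-- what changed: B computes each row's XOR directly by pairing consecutive (even,odd) numbers - odd head element, parity of the number of complete pairs, unpaired even tail - instead of A's prefix-XOR difference bulk_xor with the n%4 lookup table, and derives each row's base as start + i*length instead of mutating start.
import Mathlib
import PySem

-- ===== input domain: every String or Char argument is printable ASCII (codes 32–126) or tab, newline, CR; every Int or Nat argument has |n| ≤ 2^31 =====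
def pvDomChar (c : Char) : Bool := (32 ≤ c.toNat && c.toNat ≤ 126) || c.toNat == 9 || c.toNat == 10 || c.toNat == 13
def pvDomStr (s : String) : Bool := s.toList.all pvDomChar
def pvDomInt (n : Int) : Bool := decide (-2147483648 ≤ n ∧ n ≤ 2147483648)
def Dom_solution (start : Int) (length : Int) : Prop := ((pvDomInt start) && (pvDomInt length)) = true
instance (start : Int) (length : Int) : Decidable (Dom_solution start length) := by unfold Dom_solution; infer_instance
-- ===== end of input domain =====

-- B computes each row's XOR by pairing consecutive (even,odd) numbers — odd head, pair-count
-- parity, unpaired even tail — instead of A's prefix-XOR difference with the n%4 lookup table.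

-- ===== PORT A =====
-- inner helper bulk_xor of A, transliterated (Python % → PySem.Int.mod; list index is always in 0..3)
def bulkXor (m n : Int) : Int :=
  let m' := m - 1
  let f_m := PySem.List.pyGetD [m', 1, m' + 1, 0] (PySem.Int.mod m' 4) 0
  let f_n := PySem.List.pyGetD [n, 1, n + 1, 0] (PySem.Int.mod n 4) 0
  PySem.Int.bxor f_m f_n

def solution (start : Int) (length : Int) : Int :=
  -- state (xor, start); for i in range(length): xor ^= bulk_xor(start, start+length-i-1); start += length
  ((PySem.List.pyRange 0 length 1).foldl
    (fun (st : Int × Int) i =>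
      (PySem.Int.bxor st.1 (bulkXor st.2 (st.2 + length - i - 1)), st.2 + length))
    (0, start)).1

-- ===== PORT B =====
def solution_alt (start : Int) (length : Int) : Int :=
  -- for i in range(length): a = start+i*length; k = length-i;
  --   if a%2==1: total ^= a; a += 1; k -= 1
  --   if (k//2)%2==1: total ^= 1
  --   if k%2==1: total ^= a+k-1
  (PySem.List.pyRange 0 length 1).foldl
    (fun total i =>
      let a := start + i * length
      let k := length - i
      let tak := if PySem.Int.mod a 2 = 1 then (PySem.Int.bxor total a, a + 1, k - 1)
                 else (total, a, k)
      let total := tak.1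
      let a := tak.2.1
      let k := tak.2.2
      let total := if PySem.Int.mod (PySem.Int.floordiv k 2) 2 = 1 then PySem.Int.bxor total 1 else total
      if PySem.Int.mod k 2 = 1 then PySem.Int.bxor total (a + k - 1) else total)
    0

-- ===== PRECONDITION & SPEC =====
def Spec_solution (start : Int) (length : Int) (out : Int) : Prop := out = solution_alt start length
instance (start : Int) (length : Int) (out : Int) : Decidable (Spec_solution start length out) := by unfold Spec_solution; infer_instance

-- ===== CLAIM (what is proved, stated in full; the proofs are below) =====
def Claim_equal_solution : Prop := ∀ (start : Int) (length : Int), Dom_solution start length → Spec_solution start length (solution start length)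

-- ===== LEMMAS AND PROOFS =====

-- PySem.Int.bxor agrees with Mathlib's Int.xor (both are Python's infinite two's-complement ^)
theorem pvBxorEqXor (a b : Int) : PySem.Int.bxor a b = Int.xor a b := by
  unfold PySem.Int.bxor
  cases a with
  | ofNat m => cases b with
    | ofNat n =>
        rw [if_pos (show (0:Int) ≤ Int.ofNat m from Int.natCast_nonneg m),
          if_pos (show (0:Int) ≤ Int.ofNat n from Int.natCast_nonneg n)]
        rfl
    | negSucc n =>
        rw [if_pos (show (0:Int) ≤ Int.ofNat m from Int.natCast_nonneg m), if_neg (by omega),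
          show Int.xor (Int.ofNat m) (Int.negSucc n) = Int.negSucc (m ^^^ n) from rfl,
          show (-Int.negSucc n - 1) = (n : Int) by rw [Int.negSucc_eq]; ring,
          Int.toNat_natCast, show (Int.ofNat m).toNat = m from rfl, Int.negSucc_eq]
        omega
  | negSucc m => cases b with
    | ofNat n =>
        rw [if_neg (by omega), if_pos (show (0:Int) ≤ Int.ofNat n from Int.natCast_nonneg n),
          show Int.xor (Int.negSucc m) (Int.ofNat n) = Int.negSucc (m ^^^ n) from rfl,
          show (-Int.negSucc m - 1) = (m : Int) by rw [Int.negSucc_eq]; ring,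
          Int.toNat_natCast, show (Int.ofNat n).toNat = n from rfl, Int.negSucc_eq]
        omega
    | negSucc n =>
        rw [if_neg (by omega), if_neg (by omega),
          show Int.xor (Int.negSucc m) (Int.negSucc n) = Int.ofNat (m ^^^ n) from rfl,
          show (-Int.negSucc m - 1) = (m : Int) by rw [Int.negSucc_eq]; ring,
          show (-Int.negSucc n - 1) = (n : Int) by rw [Int.negSucc_eq]; ring,
          Int.toNat_natCast, Int.toNat_natCast]
        rfl

theorem pvIntXorAssoc (a b c : Int) : Int.xor (Int.xor a b) c = Int.xor a (Int.xor b c) := by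
  cases a <;> cases b <;> cases c <;> simp [Int.xor, Nat.xor_assoc]

theorem pvBxorAssoc (a b c : Int) :
    PySem.Int.bxor (PySem.Int.bxor a b) c = PySem.Int.bxor a (PySem.Int.bxor b c) := by
  simp only [pvBxorEqXor, pvIntXorAssoc]

-- left identity, left-commutativity and cancellation for Python's ^
theorem pvBxorZeroLeft (a : Int) : PySem.Int.bxor 0 a = a := by
  rw [PySem.Int.bxor_comm, PySem.Int.bxor_zero]

theorem pvBxorLeftComm (a b c : Int) :
    PySem.Int.bxor a (PySem.Int.bxor b c) = PySem.Int.bxor b (PySem.Int.bxor a c) := by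
  rw [← pvBxorAssoc, PySem.Int.bxor_comm a b, pvBxorAssoc]

theorem pvBxorCancel (a b : Int) : PySem.Int.bxor a (PySem.Int.bxor a b) = b := by
  rw [← pvBxorAssoc, PySem.Int.bxor_self, pvBxorZeroLeft]

-- Python's 2*j ^ 1 = 2*j + 1 on Nat
theorem pvNatXorOne (j : Nat) : 2*j ^^^ 1 = 2*j + 1 := by
  apply Nat.eq_of_testBit_eq
  intro i
  cases i with
  | zero => simp [Nat.testBit_zero]
  | succ i =>
      rw [Nat.testBit_succ, Nat.testBit_succ, Nat.xor_div_two]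
      have h1 : (2*j) / 2 = j := by omega
      have h2 : (2*j+1) / 2 = j := by omega
      simp [h1, h2]

-- Python's a ^ 1 = a + 1 for every even integer a (both signs)
theorem pvEvenXorOne (a : Int) (h : a % 2 = 0) : PySem.Int.bxor a 1 = a + 1 := by
  by_cases ha : 0 <= a
  · obtain ⟨m, hm⟩ : ∃ m : Nat, a = (2*m : Nat) := ⟨a.toNat / 2, by omega⟩
    rw [hm, show ((1:Int)) = ((1:Nat) : Int) from rfl, PySem.Int.bxor_natCast, pvNatXorOne]
    omega
  · obtain ⟨m, hm⟩ : ∃ m : Nat, -a - 1 = (2*m+1 : Nat) := ⟨(-a-1).toNat / 2, by omega⟩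
    have hx : (2*m+1) ^^^ 1 = 2*m := by
      rw [show 2*m+1 = 2*m ^^^ 1 from (pvNatXorOne m).symm, Nat.xor_assoc, Nat.xor_self, Nat.xor_zero]
    have hbx : PySem.Int.bxor a 1 = -(((-a-1).toNat ^^^ (1:Int).toNat : Nat) : Int) - 1 := by
      unfold PySem.Int.bxor
      rw [if_neg ha, if_pos (show (0:Int) <= 1 by omega)]
    rw [hbx, show (-a-1).toNat = 2*m+1 by omega, show (1:Int).toNat = 1 from rfl, hx]
    omega

-- 1 ^ (x+1) = x for even x
theorem pvOddXorOne (x : Int) (h : x % 2 = 0) : PySem.Int.bxor 1 (x + 1) = x := by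
  rw [← pvEvenXorOne x h, PySem.Int.bxor_comm x 1, pvBxorCancel]

-- the prefix-XOR table of A, f(k) = [k,1,k+1,0][k % 4]
def pvPf (k : Int) : Int := PySem.List.pyGetD [k, 1, k+1, 0] (PySem.Int.mod k 4) 0

theorem pvPf_eval (k : Int) :
    pvPf k = if k % 4 = 0 then k else if k % 4 = 1 then 1 else if k % 4 = 2 then k + 1 else 0 := by
  have hm : PySem.Int.mod k 4 = k % 4 := PySem.Int.mod_eq_emod_of_pos (by omega)
  have h4 : k % 4 = 0 ∨ k % 4 = 1 ∨ k % 4 = 2 ∨ k % 4 = 3 := by omega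
  unfold pvPf
  rw [hm]
  rcases h4 with h | h | h | h <;> rw [h] <;> simp [PySem.List.pyGetD]

-- the prefix-XOR recurrence: f(a) = f(a-1) ^ a, for EVERY integer a
theorem pvPf_step (e : Int) : pvPf e = PySem.Int.bxor (pvPf (e-1)) e := by
  have h4 : e % 4 = 0 ∨ e % 4 = 1 ∨ e % 4 = 2 ∨ e % 4 = 3 := by omega
  rw [pvPf_eval, pvPf_eval]
  rcases h4 with h | h | h | h
  · rw [if_pos h, if_neg (by omega), if_neg (by omega), if_neg (by omega), pvBxorZeroLeft]
  · obtain ⟨x, rfl⟩ : ∃ x, e = x + 1 := ⟨e-1, by ring⟩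
    rw [show x + 1 - 1 = x by ring]
    rw [if_neg (by omega), if_pos (by omega), if_pos (by omega),
      ← pvEvenXorOne x (by omega), pvBxorCancel]
  · rw [if_neg (by omega), if_neg (by omega), if_pos h, if_neg (by omega), if_pos (by omega),
      PySem.Int.bxor_comm, pvEvenXorOne e (by omega)]
  · rw [if_neg (by omega), if_neg (by omega), if_neg (by omega),
      if_neg (by omega), if_neg (by omega), if_pos (by omega),
      show e - 1 + 1 = e by ring, PySem.Int.bxor_self]

-- B's even-aligned tail: pair-count parity plus unpaired tail = prefix-XOR difference
set_option maxHeartbeats 1000000 in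
theorem pvEvenBody (acc b t : Int) (hb : b % 2 = 0) (ht : 0 ≤ t) :
    (let x := if PySem.Int.mod (PySem.Int.floordiv t 2) 2 = 1 then PySem.Int.bxor acc 1 else acc
     if PySem.Int.mod t 2 = 1 then PySem.Int.bxor x (b + t - 1) else x)
    = PySem.Int.bxor acc (PySem.Int.bxor (pvPf (b-1)) (pvPf (b+t-1))) := by
  have hd : PySem.Int.floordiv t 2 = t / 2 := PySem.Int.floordiv_eq_ediv_of_pos (by omega)
  have hm1 : PySem.Int.mod (t/2) 2 = (t/2) % 2 := PySem.Int.mod_eq_emod_of_pos (by omega)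
  have hm2 : PySem.Int.mod t 2 = t % 2 := PySem.Int.mod_eq_emod_of_pos (by omega)
  have hb4 : b % 4 = 0 ∨ b % 4 = 2 := by omega
  have ht4 : t % 4 = 0 ∨ t % 4 = 1 ∨ t % 4 = 2 ∨ t % 4 = 3 := by omega
  simp only [hd, hm1, hm2]
  rw [pvPf_eval (b-1), pvPf_eval (b+t-1)]
  rcases hb4 with hb4 | hb4 <;> rcases ht4 with ht4 | ht4 | ht4 | ht4
  · -- b≡0, t≡0: nothing = 0 ^ 0
    split_ifs <;> try (exfalso; omega)
    rw [pvBxorZeroLeft, PySem.Int.bxor_zero]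
  · -- b≡0, t≡1: tail = 0 ^ (b+t-1)
    split_ifs <;> try (exfalso; omega)
    rw [pvBxorZeroLeft]
  · -- b≡0, t≡2: pair = 0 ^ 1
    split_ifs <;> try (exfalso; omega)
    rw [pvBxorZeroLeft]
  · -- b≡0, t≡3: pair ^ tail = 0 ^ ((b+t-1)+1)
    split_ifs <;> try (exfalso; omega)
    rw [pvBxorZeroLeft, pvBxorAssoc, PySem.Int.bxor_comm 1 (b+t-1),
      pvEvenXorOne (b+t-1) (by omega)]
  · -- b≡2, t≡0: nothing = 1 ^ 1
    split_ifs <;> try (exfalso; omega)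
    rw [PySem.Int.bxor_self, PySem.Int.bxor_zero]
  · -- b≡2, t≡1: tail = 1 ^ ((b+t-1)+1)
    split_ifs <;> try (exfalso; omega)
    rw [pvOddXorOne (b+t-1) (by omega)]
  · -- b≡2, t≡2: pair = 1 ^ 0
    split_ifs <;> try (exfalso; omega)
    rw [PySem.Int.bxor_zero]
  · -- b≡2, t≡3: pair ^ tail = 1 ^ (b+t-1)
    split_ifs <;> try (exfalso; omega)
    rw [pvBxorAssoc]

-- one row of B equals one bulk_xor term of A (k ≥ 1)
theorem pvStepEq (acc a k : Int) (hk : 1 ≤ k) :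
    (let tak := if PySem.Int.mod a 2 = 1 then (PySem.Int.bxor acc a, a + 1, k - 1)
                else (acc, a, k)
     let total := tak.1
     let a := tak.2.1
     let k := tak.2.2
     let total := if PySem.Int.mod (PySem.Int.floordiv k 2) 2 = 1 then PySem.Int.bxor total 1 else total
     if PySem.Int.mod k 2 = 1 then PySem.Int.bxor total (a + k - 1) else total)
    = PySem.Int.bxor acc (PySem.Int.bxor (pvPf (a-1)) (pvPf (a+k-1))) := by
  have hma : PySem.Int.mod a 2 = a % 2 := PySem.Int.mod_eq_emod_of_pos (by omega)
  by_cases ha : a % 2 = 1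
  · rw [show (if PySem.Int.mod a 2 = 1 then (PySem.Int.bxor acc a, a + 1, k - 1)
        else (acc, a, k)) = (PySem.Int.bxor acc a, a + 1, k - 1) from by rw [hma, if_pos ha]]
    have h := pvEvenBody (PySem.Int.bxor acc a) (a+1) (k-1) (by omega) (by omega)
    simp only at h ⊢
    rw [show a + 1 + (k - 1) - 1 = a + k - 1 by ring] at h ⊢
    rw [show a + 1 - 1 = a by ring] at h
    rw [h, pvPf_step a]
    simp only [pvBxorAssoc, pvBxorLeftComm, pvBxorCancel]
  · rw [show (if PySem.Int.mod a 2 = 1 then (PySem.Int.bxor acc a, a + 1, k - 1)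
        else (acc, a, k)) = (acc, a, k) from by rw [hma, if_neg ha]]
    exact pvEvenBody acc a k (by omega) (by omega)

-- lockstep: A's running start after i steps is start + i*length
theorem pvLoop (n : Nat) : ∀ (st len j acc : Int), len - j = (n : Int) →
    ((PySem.List.pyRange j len 1).foldl
      (fun (p : Int × Int) i =>
        (PySem.Int.bxor p.1 (bulkXor p.2 (p.2 + len - i - 1)), p.2 + len))
      (acc, st + j * len)).1
    = (PySem.List.pyRange j len 1).foldl
        (fun total i =>
          let a := st + i * len
          let k := len - i
          let tak := if PySem.Int.mod a 2 = 1 then (PySem.Int.bxor total a, a + 1, k - 1)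
                     else (total, a, k)
          let total := tak.1
          let a := tak.2.1
          let k := tak.2.2
          let total := if PySem.Int.mod (PySem.Int.floordiv k 2) 2 = 1 then PySem.Int.bxor total 1 else total
          if PySem.Int.mod k 2 = 1 then PySem.Int.bxor total (a + k - 1) else total)
        acc := by
  induction n with
  | zero =>
      intro st len j acc hn
      rw [PySem.List.pyRange_one_eq_nil (by omega : len <= j)]
      simp only [List.foldl_nil]
  | succ n ih =>
      intro st len j acc hn
      rw [PySem.List.pyRange_one_cons (by omega : j < len)]
      simp only [List.foldl_cons]
      have hstep : st + j * len + len = st + (j + 1) * len := by ring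
      rw [hstep, ih st len (j+1) _ (by omega)]
      congr 1
      rw [pvStepEq acc (st + j * len) (len - j) (by omega),
        show st + j * len + (len - j) - 1 = st + j * len + len - j - 1 by ring,
        show st + (j + 1) * len - j - 1 = st + j * len + len - j - 1 by ring]
      rfl

-- ===== VERDICT (by name: the statement is the Claim_ definition above) =====
theorem solution_spec : Claim_equal_solution := by
  intro start length _
  unfold Spec_solution solution solution_alt
  rcases (by omega : length <= 0 ∨ 0 < length) with hl | hl
  · rw [PySem.List.pyRange_one_eq_nil hl]
    simp only [List.foldl_nil]
  · have h0 : start = start + 0 * length := by ring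
    conv_lhs => rw [h0]
    rw [pvLoop length.toNat start length 0 0 (by omega)]
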